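-- pv_equiv track=rewrite | github.com/enduringwriter/Python_COMSC_140 | Lab5_3_Function_Find_Min_Value/main.py | mineven
-- ===== SOURCE A (Python) =====
-- def mineven(numbers):
--     """
--     Determine the minimum even number in a list, extract it,
--     and print the min even number and the updated list.
--
--     In Python, lists are mutable objects, and when you pass a list to a function,
--     you are passing a reference to that list. This means that any modifications to the list
--     within the function will affect the original list outside the function.
--     You don't need to pass the list back out of the function because
--     the changes are made directly to the original list.
--     """
--
--     even_list = []
--     for num in numbers:
--         if num % 2 == 0:
--             even_list.append(num)
--     minval = min(even_list)
--     numbers.remove(minval)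
--
--     return minval
-- ===== SOURCE B (Python) =====
-- def mineven(numbers):
--     # Single-pass running minimum over even elements (no intermediate even_list);
--     # same in-place removal of the minimum even value as the original.
--     minval = None
--     for num in numbers:
--         if num % 2 == 0 and (minval is None or num < minval):
--             minval = num
--     if minval is None:
--         raise ValueError("min() arg is an empty sequence")
--     numbers.remove(minval)
--     return minval
-- ===== Notes on version B (the rewrite author's own statement) =====
-- stated objective: simpler
-- what changed: Replaces the build-even-list-then-min two-pass structure with a single pass keeping a running minimum over even elements; same in-place removal and return value.
import Mathlib
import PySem

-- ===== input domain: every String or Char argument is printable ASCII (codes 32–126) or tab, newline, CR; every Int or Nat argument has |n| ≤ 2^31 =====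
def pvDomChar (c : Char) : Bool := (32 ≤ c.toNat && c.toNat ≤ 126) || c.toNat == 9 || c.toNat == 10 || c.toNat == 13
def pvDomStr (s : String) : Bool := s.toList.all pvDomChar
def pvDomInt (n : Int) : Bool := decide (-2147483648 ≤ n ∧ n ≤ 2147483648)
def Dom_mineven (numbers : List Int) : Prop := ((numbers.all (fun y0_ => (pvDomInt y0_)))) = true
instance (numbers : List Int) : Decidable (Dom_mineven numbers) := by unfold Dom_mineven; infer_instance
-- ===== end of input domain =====

-- B fuses A's filter-then-min two-pass structure into one running-minimum scan (objective: simpler).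
-- A also removes the returned value from `numbers` in place; B performs the same mutation; the
-- equivalence proved here is about the return value.


-- ===== PORT A =====
-- even_list built by appending, then min(even_list); return value only (the remove does not affect it).
def mineven (numbers : List Int) : Int :=
  let even_list := numbers.foldl (fun l num => if PySem.Int.mod num 2 == 0 then l ++ [num] else l) []
  match PySem.List.min? even_list (fun x => x) with
  | some m => m
  | none => 0  -- unreachable under Pre_mineven (Python's min([]) raises ValueError there)

-- ===== PORT B =====
-- single pass: running minimum over the even elements, carried as an Option.
def mineven_alt (numbers : List Int) : Int :=
  let r := numbers.foldl
    (fun acc num =>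
      if PySem.Int.mod num 2 == 0 then
        match acc with
        | none => some num
        | some m => if num < m then some num else some m
      else acc) none
  match r with
  | some m => m
  | none => 0  -- unreachable under Pre_mineven (B raises ValueError there)

-- ===== PRECONDITION & SPEC =====
-- Pre_ excludes lists with no even element, where A raises ValueError from min([]) (and B raises too).
def Pre_mineven (numbers : List Int) : Prop :=
  (numbers.any (fun n => PySem.Int.mod n 2 == 0)) = true
instance (numbers : List Int) : Decidable (Pre_mineven numbers) := by unfold Pre_mineven; infer_instance
def pvWitness_mineven : List Int := [3, 8, 5, 4]

def Spec_mineven (numbers : List Int) (out : Int) : Prop := out = mineven_alt numbers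
instance (numbers : List Int) (out : Int) : Decidable (Spec_mineven numbers out) := by unfold Spec_mineven; infer_instance

-- ===== CLAIM (what is proved, stated in full; the proofs are below) =====
def Claim_equal_mineven : Prop := ∀ (numbers : List Int), Dom_mineven numbers → Pre_mineven numbers → Spec_mineven numbers (mineven numbers)

-- ===== LEMMAS AND PROOFS =====

-- B's fold over the filtered list, started at `some a`, is the running minimum.
theorem pv_foldl_opt_min (l : List Int) (a : Int) :
    l.foldl (fun acc num =>
      match acc with
      | none => some num
      | some m => if num < m then some num else some m) (some a)
    = some (l.foldl min a) := by
  induction l generalizing a with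
  | nil => rfl
  | cons h t ih =>
    simp only [List.foldl_cons]
    by_cases hlt : h < a
    · rw [if_pos hlt, ih, min_eq_right hlt.le]
    · rw [if_neg hlt, ih, min_eq_left (by omega : a ≤ h)]

-- Both ports equal the min of the even sublist.
theorem mineven_eq_alt (numbers : List Int) :
    mineven numbers = mineven_alt numbers := by
  unfold mineven mineven_alt
  rw [PySem.List.foldl_append_if_eq_filter, PySem.List.foldl_if_eq_foldl_filter]
  simp only [List.nil_append]
  cases hf : numbers.filter (fun num => PySem.Int.mod num 2 == 0) with
  | nil => rfl
  | cons x t =>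
    rw [PySem.List.min?_id_cons, List.foldl_cons, pv_foldl_opt_min]

-- ===== VERDICT (by name: the statement is the Claim_ definition above) =====
theorem mineven_spec : Claim_equal_mineven := by
  intro numbers _ _
  exact mineven_eq_alt numbers
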